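-- pv_equiv track=rewrite | github.com/harsha094/Coding | Array/Q56/Process_Sequence.py | process_sequence
-- ===== SOURCE A (Python) =====
-- def process_sequence(n, arr):
--     result = []
--     temp = [] #temp variable
--     zero_found = False
--
--     for num in arr:
--         if num == 0:
--             if zero_found:
--                 result.extend(temp)
--                 temp = []
--             else:
--                 zero_found = True
--                 temp = []
--         elif zero_found:
--             # Collect numbers after the first zero
--             temp.append(num)
--      # If no result was collected after two zeros, return -1
--     return result if result else [-1]
-- ===== SOURCE B (Python) =====
-- def process_sequence(n, arr):
--     # boundary-index computation instead of a flush-on-zero state machine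
--     if arr.count(0) < 2:
--         return [-1]
--     first = arr.index(0)
--     last = len(arr) - 1 - arr[::-1].index(0)
--     result = [x for x in arr[first + 1:last] if x != 0]
--     return result if result else [-1]
-- ===== Notes on version B (the rewrite author's own statement) =====
-- stated objective: simpler
-- what changed: Replaced A's flush-on-each-zero state machine (result/temp/zero_found fold) by computing the first and last zero indices directly and returning the nonzero elements of the slice strictly between them.
import Mathlib
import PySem

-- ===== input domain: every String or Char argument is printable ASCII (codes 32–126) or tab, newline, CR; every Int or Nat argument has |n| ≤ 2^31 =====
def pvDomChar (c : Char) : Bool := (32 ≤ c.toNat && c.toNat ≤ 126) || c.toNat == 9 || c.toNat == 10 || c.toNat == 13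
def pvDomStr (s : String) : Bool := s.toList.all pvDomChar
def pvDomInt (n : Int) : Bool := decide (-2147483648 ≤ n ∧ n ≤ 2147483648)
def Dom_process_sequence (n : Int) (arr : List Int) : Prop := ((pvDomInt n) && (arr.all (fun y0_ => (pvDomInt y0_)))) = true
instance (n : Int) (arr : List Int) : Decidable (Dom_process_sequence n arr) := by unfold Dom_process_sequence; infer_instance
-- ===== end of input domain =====

-- B replaces A's flush-on-each-zero state machine by a first/last-zero boundary computation
-- plus one slice-and-filter (simpler; same cost).

-- ===== PORT A =====
-- state = (result, temp, zero_found), exactly A's three variables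
def pvStepA (st : List Int × List Int × Bool) (num : Int) : List Int × List Int × Bool :=
  if num = 0 then
    if st.2.2 then (st.1 ++ st.2.1, [], true) else (st.1, [], true)
  else if st.2.2 then (st.1, st.2.1 ++ [num], st.2.2)
  else st

def process_sequence (n : Int) (arr : List Int) : List Int :=
  let st := arr.foldl pvStepA ([], [], false)
  if st.1 = [] then [-1] else st.1

-- ===== PORT B =====
-- .index is only called after the count-guard, so index? is always `some`; the .getD 0 default is never taken.
def process_sequence_alt (n : Int) (arr : List Int) : List Int :=
  if PySem.List.count arr 0 < 2 then [-1]
  else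
    let first : Nat := (PySem.List.index? arr 0).getD 0
    let last : Int := (arr.length : Int) - 1 - ((PySem.List.index? arr.reverse 0).getD 0 : Nat)
    let result := (PySem.List.slice arr (some ((first : Int) + 1)) (some last)).filter (fun x => x != 0)
    if result = [] then [-1] else result

-- ===== PRECONDITION & SPEC =====
def Spec_process_sequence (n : Int) (arr : List Int) (out : List Int) : Prop := out = process_sequence_alt n arr
instance (n : Int) (arr : List Int) (out : List Int) : Decidable (Spec_process_sequence n arr out) := by unfold Spec_process_sequence; infer_instance

-- ===== CLAIM (what is proved, stated in full; the proofs are below) =====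
def Claim_equal_process_sequence : Prop := ∀ (n : Int) (arr : List Int), Dom_process_sequence n arr → Spec_process_sequence n arr (process_sequence n arr)

-- ===== LEMMAS AND PROOFS =====

-- before the first zero, A's fold does nothing
lemma foldA_no_zero_false (p : List Int) (hp : (0:Int) ∉ p) (r t : List Int) :
    p.foldl pvStepA (r, t, false) = (r, t, false) := by
  induction p with
  | nil => rfl
  | cons a p ih =>
    simp only [List.mem_cons, not_or] at hp
    simp only [List.foldl_cons, pvStepA, if_neg (Ne.symm hp.1)]
    exact ih hp.2

-- after the last zero, A only accumulates into temp
lemma foldA_no_zero_true (s : List Int) (hs : (0:Int) ∉ s) (r t : List Int) :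
    s.foldl pvStepA (r, t, true) = (r, t ++ s, true) := by
  induction s generalizing t with
  | nil => simp
  | cons a s ih =>
    simp only [List.mem_cons, not_or] at hs
    simp only [List.foldl_cons, pvStepA, if_neg (Ne.symm hs.1)]
    simpa using ih hs.2 (t ++ [a])

lemma filter_ne_zero (t : List Int) (ht : (0:Int) ∉ t) : t.filter (fun x => x != 0) = t :=
  List.filter_eq_self.2 fun a ha => by
    simp only [bne_iff_ne, ne_eq]
    rintro rfl; exact ht ha

-- between the first and last zero, A collects exactly the nonzero elements
lemma foldA_mid (m : List Int) (s : List Int) (hs : (0:Int) ∉ s) (r t : List Int)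
    (ht : (0:Int) ∉ t) :
    (m ++ 0 :: s).foldl pvStepA (r, t, true) =
      (r ++ (t ++ m).filter (fun x => x != 0), s, true) := by
  induction m generalizing r t with
  | nil =>
    simp only [List.nil_append, List.foldl_cons, pvStepA, List.append_nil, reduceIte]
    rw [foldA_no_zero_true s hs, filter_ne_zero t ht]
    simp
  | cons a m ih =>
    by_cases ha : a = (0:Int)
    · subst ha
      simp only [List.cons_append, List.foldl_cons, pvStepA, reduceIte]
      rw [ih (r ++ t) [] (by simp)]
      simp [List.filter_append, List.append_assoc, filter_ne_zero t ht]
    · have step : pvStepA (r, t, true) a = (r, t ++ [a], true) := by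
        simp [pvStepA, ha]
      simp only [List.cons_append, List.foldl_cons, step]
      rw [ih r (t ++ [a]) (by simp [ht, Ne.symm ha])]
      simp [List.filter_append, List.append_assoc]

-- decomposition at the first zero
lemma first_zero_split (l : List Int) (h : (0:Int) ∈ l) :
    ∃ p s, l = p ++ 0 :: s ∧ (0:Int) ∉ p := by
  obtain ⟨k, hk⟩ := Option.isSome_iff_exists.mp ((PySem.List.index?_isSome_iff l 0).2 h)
  obtain ⟨p, s, rfl, -, hp⟩ := (PySem.List.index?_eq_some_iff l 0 k).1 hk
  exact ⟨p, s, rfl, hp⟩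

lemma stepA_zero_init : pvStepA (([]:List Int), ([]:List Int), false) 0 = ([], [], true) := by
  simp [pvStepA]

theorem process_sequence_spec : Claim_equal_process_sequence := by
  intro n arr _
  unfold Spec_process_sequence
  by_cases h2 : 2 ≤ List.count (0:Int) arr
  · -- at least two zeros: decompose arr = p ++ 0 :: m ++ 0 :: s with 0 ∉ p, 0 ∉ s
    obtain ⟨p, r0, rfl, hp⟩ := first_zero_split arr (List.count_pos_iff.1 (by omega))
    have hr0 : (0:Int) ∈ r0 := by
      have hcp : List.count (0:Int) p = 0 := List.count_eq_zero.2 hp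
      rw [List.count_append, hcp, List.count_cons_self] at h2
      exact List.count_pos_iff.1 (by omega)
    obtain ⟨q, w, hqw, hq⟩ := first_zero_split r0.reverse (by simpa using hr0)
    have hr0' : r0 = w.reverse ++ 0 :: q.reverse := by
      have := congrArg List.reverse hqw
      simpa using this
    subst hr0'
    set m := w.reverse with hm
    set s := q.reverse with hsdef
    have hs : (0:Int) ∉ s := by simpa [hsdef] using hq
    -- A's fold
    have hstA : List.foldl pvStepA ([], [], false) (p ++ 0 :: (m ++ 0 :: s)) =
        (m.filter (fun x => x != 0), s, true) := by
      rw [List.foldl_append, foldA_no_zero_false p hp, List.foldl_cons, stepA_zero_init,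
        foldA_mid m s hs [] [] (by simp)]
      simp
    -- B's pieces
    have hguard : ¬ PySem.List.count (p ++ 0 :: (m ++ 0 :: s)) 0 < 2 := by
      rw [PySem.List.count_eq]; omega
    have hfirst : PySem.List.index? (p ++ 0 :: (m ++ 0 :: s)) 0 = some p.length :=
      (PySem.List.index?_eq_some_iff _ 0 p.length).2 ⟨p, m ++ 0 :: s, rfl, rfl, hp⟩
    have hrev : (p ++ 0 :: (m ++ 0 :: s)).reverse =
        s.reverse ++ 0 :: (m.reverse ++ 0 :: p.reverse) := by
      simp
    have hsrev : (0:Int) ∉ s.reverse := by simpa using hs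
    have hlastidx : PySem.List.index? (p ++ 0 :: (m ++ 0 :: s)).reverse 0 = some s.length := by
      rw [hrev]
      exact (PySem.List.index?_eq_some_iff _ 0 s.length).2
        ⟨s.reverse, m.reverse ++ 0 :: p.reverse, rfl, by simp, hsrev⟩
    have hlen : (p ++ 0 :: (m ++ 0 :: s)).length = p.length + m.length + s.length + 2 := by
      simp; omega
    have hlast : (((p ++ 0 :: (m ++ 0 :: s)).length : Int) - 1 - (s.length : Nat)) =
        (((p.length + 1 : Nat)) : Int) + ((m.length : Nat) : Int) := by
      rw [hlen]; push_cast; ring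
    have hdrop : (p ++ 0 :: (m ++ 0 :: s)).drop (p.length + 1) = m ++ 0 :: s := by
      have h1 : p ++ 0 :: (m ++ 0 :: s) = (p ++ [0]) ++ (m ++ 0 :: s) := by simp
      have h2 : (p ++ [0]).length = p.length + 1 := by simp
      rw [h1, ← h2, List.drop_left]
    have hcast : ((p.length : Nat) : Int) + 1 = (((p.length + 1 : Nat)) : Int) := by push_cast; ring
    simp only [process_sequence, process_sequence_alt, hstA, if_neg hguard, hfirst, hlastidx,
      Option.getD_some]
    rw [hcast, hlast, PySem.List.slice_natCast_add, hdrop, List.take_left' rfl]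
  · -- fewer than two zeros: both return [-1]
    have hBr : process_sequence_alt n arr = [-1] := by
      unfold process_sequence_alt
      rw [if_pos (by rw [PySem.List.count_eq]; omega)]
    rw [hBr]
    by_cases h0 : (0:Int) ∈ arr
    · obtain ⟨p, s, rfl, hp⟩ := first_zero_split arr h0
      have hs : (0:Int) ∉ s := by
        intro hmem
        exact h2 (by
          rw [List.count_append, List.count_cons_self]
          have := List.count_pos_iff.2 hmem
          omega)
      have hst : List.foldl pvStepA ([], [], false) (p ++ 0 :: s) = ([], s, true) := by
        rw [List.foldl_append, foldA_no_zero_false p hp, List.foldl_cons, stepA_zero_init,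
          foldA_no_zero_true s hs]
        simp
      simp [process_sequence, hst]
    · have hst := foldA_no_zero_false arr h0 [] []
      simp [process_sequence, hst]
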